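-- pv_equiv track=rewrite | github.com/hadiezz12/ALGO- | PROJETF.py | Complet
-- ===== SOURCE A (Python) =====
-- def estComplet(automate):
--     """Vérifie si un automate dict est complet"""
--     matrice = automate["matrice"]  # récupère la matrice des transitions
--     nbEtat = len(matrice)  # nombre d'états (lignes)
--     nbSymbole = len(matrice[0])  # nombre de symboles (colonnes)
--     for i in range(nbEtat):  # pour chaque état i
--         for j in range(nbSymbole):  # pour chaque symbole j
--             if matrice[i][j] == -1:  # si une transition manquante est trouvée
--                 return False  # l'automate n'est pas complet
--     return True  # aucune transition manquante => complet
--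
-- def Complet(automate):
--     """Rend un automate complet en ajoutant un état poubelle"""
--     if estComplet(automate):  # si déjà complet, ne rien faire
--         return automate
--     matrice = automate["matrice"]  # récupère la matrice existante
--     nbEtat = len(matrice)  # nombre d'états avant d'ajouter l'état poubelle
--     nbSymbole = len(matrice[0])  # nombre de symboles
--     # Ajouter l'état poubelle: une nouvelle ligne pointant vers elle-même
--     matrice.append([nbEtat] * nbSymbole)  # chaque symbole mène vers l'état poubelle (index = nbEtat)
--     # Rediriger les transitions manquantes (-1) vers l'état poubelle
--     for i in range(nbEtat):  # pour chaque ancien état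
--         for j in range(nbSymbole):  # pour chaque symbole
--             if matrice[i][j] == -1:  # si transition manquante
--                 matrice[i][j] = nbEtat  # pointer vers l'état poubelle
--     return automate  # retourne l'automate modifié
-- ===== SOURCE B (Python) =====
-- def Complet(automate):
--     """Rend un automate complet en ajoutant un etat poubelle (one pass: collect missing coords, then targeted writes, in place)"""
--     matrice = automate["matrice"]
--     nbSymbole = len(matrice[0])
--     missing = [(i, j) for i in range(len(matrice))
--                for j in range(nbSymbole) if matrice[i][j] == -1]
--     if not missing:
--         return automate
--     nbEtat = len(matrice)
--     matrice.append([nbEtat] * nbSymbole)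
--     for i, j in missing:
--         matrice[i][j] = nbEtat
--     return automate
-- ===== Notes on version B (the rewrite author's own statement) =====
-- stated objective: alternative
-- what changed: A first scans the whole matrix to decide completeness and then re-scans every cell rewriting the -1 entries; B makes one pass collecting the coordinates of the missing (-1) transitions, returns unchanged if none were found, and otherwise appends the trash row and writes only at the collected coordinates.
import Mathlib
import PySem

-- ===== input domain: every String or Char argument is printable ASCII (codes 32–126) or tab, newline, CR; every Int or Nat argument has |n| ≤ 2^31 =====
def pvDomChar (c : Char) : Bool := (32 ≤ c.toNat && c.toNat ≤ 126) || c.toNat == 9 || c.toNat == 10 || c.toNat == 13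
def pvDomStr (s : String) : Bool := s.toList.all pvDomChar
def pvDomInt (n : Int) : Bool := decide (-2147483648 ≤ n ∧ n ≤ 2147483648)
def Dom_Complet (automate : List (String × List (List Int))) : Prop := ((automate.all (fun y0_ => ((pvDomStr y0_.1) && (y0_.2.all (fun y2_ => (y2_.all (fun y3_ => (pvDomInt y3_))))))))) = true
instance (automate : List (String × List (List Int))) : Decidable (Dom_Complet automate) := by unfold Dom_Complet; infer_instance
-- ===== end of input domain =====

-- B replaces A's completeness scan + full rewrite re-scan by ONE pass collecting the coordinates
-- of the missing transitions, then targeted writes at just those coordinates (objective: alternative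
-- decomposition). Both Pythons mutate automate["matrice"] in place and return the same dict object.

-- matrice[i][j] read (in-range for every cell either port reads under Pre_; default 0 arbitrary)
def pvCell (m : List (List Int)) (i j : Nat) : Int := (m.getD i []).getD j 0
-- matrice[i][j] = v
def pvSetCell (m : List (List Int)) (i j : Nat) (v : Int) : List (List Int) :=
  m.modify i (fun row => row.set j v)

-- ===== PORT A =====
def pvEstComplet (m : List (List Int)) : Bool :=
  let nbEtat := m.length
  let nbSymbole := (m.headD []).length
  (List.range nbEtat).all fun i => (List.range nbSymbole).all fun j => !(pvCell m i j == -1)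

def Complet (automate : List (String × List (List Int))) : List (String × List (List Int)) :=
  match (PySem.Dict.mk automate).get? "matrice" with
  | none => automate  -- KeyError in Python: outside Pre_
  | some m =>
    if pvEstComplet m then automate
    else
      let nbEtat := m.length
      let nbSymbole := (m.headD []).length
      let m2 := (List.range nbEtat).foldl (fun acc i =>
          (List.range nbSymbole).foldl (fun acc j =>
            if pvCell acc i j == -1 then pvSetCell acc i j (nbEtat : Int) else acc) acc)
        (m ++ [List.replicate nbSymbole (nbEtat : Int)])
      ((PySem.Dict.mk automate).insert "matrice" m2).items

-- ===== PORT B =====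
def Complet_alt (automate : List (String × List (List Int))) : List (String × List (List Int)) :=
  match (PySem.Dict.mk automate).get? "matrice" with
  | none => automate  -- KeyError in Python: outside Pre_
  | some m =>
    let nbSymbole := (m.headD []).length
    let missing := (List.range m.length).flatMap fun i =>
        ((List.range nbSymbole).filter fun j => pvCell m i j == -1).map fun j => (i, j)
    if missing.isEmpty then automate
    else
      let nbEtat := m.length
      let m2 := missing.foldl (fun acc c => pvSetCell acc c.1 c.2 (nbEtat : Int))
        (m ++ [List.replicate nbSymbole (nbEtat : Int)])
      ((PySem.Dict.mk automate).insert "matrice" m2).items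

-- ===== PRECONDITION & SPEC =====
-- Pre_ excludes exactly the inputs where Python A raises: key "matrice" absent (KeyError),
-- empty matrix (IndexError on matrice[0]), or some row shorter than row 0 (IndexError on matrice[i][j]).
def Pre_Complet (automate : List (String × List (List Int))) : Prop :=
  (match (PySem.Dict.mk automate).get? "matrice" with
   | some (r :: rs) => rs.all (fun row => decide (r.length ≤ row.length))
   | _ => false) = true
instance (automate : List (String × List (List Int))) : Decidable (Pre_Complet automate) := by
  unfold Pre_Complet; infer_instance

def pvWitness_Complet : (List (String × List (List Int))) := [("matrice", [[-1, 0], [1, -1]])]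

def Spec_Complet (automate : List (String × List (List Int))) (out : List (String × List (List Int))) : Prop := out = Complet_alt automate
instance (automate : List (String × List (List Int))) (out : List (String × List (List Int))) : Decidable (Spec_Complet automate out) := by unfold Spec_Complet; infer_instance

-- ===== CLAIM (what is proved, stated in full; the proofs are below) =====
def Claim_equal_Complet : Prop := ∀ (automate : List (String × List (List Int))), Dom_Complet automate → Pre_Complet automate → Spec_Complet automate (Complet automate)

-- ===== LEMMAS AND PROOFS =====

-- writing one cell leaves every other cell unchanged
lemma pvCell_setCell_ne {c c' : Nat × Nat} (M : List (List Int)) (v : Int) (h : c' ≠ c) :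
    pvCell (pvSetCell M c.1 c.2 v) c'.1 c'.2 = pvCell M c'.1 c'.2 := by
  unfold pvCell pvSetCell
  rcases c with ⟨i, j⟩; rcases c' with ⟨i', j'⟩
  simp only [List.getD_eq_getElem?_getD, List.getElem?_modify]
  by_cases hi : i = i'
  · subst hi
    have hj : j' ≠ j := fun hj => h (by simp [hj])
    cases hrow : M[i]? with
    | none => simp
    | some row => simp [List.getElem?_set_ne (Ne.symm hj)]
  · simp [hi]

-- a left-to-right pass whose condition reads the evolving matrix equals filtering by the
-- original matrix and writing unconditionally, as long as the visited cells are distinct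
lemma pv_freeze (v : Int) : ∀ (cs : List (Nat × Nat)) (M0 M : List (List Int)),
    (∀ c ∈ cs, pvCell M c.1 c.2 = pvCell M0 c.1 c.2) → cs.Nodup →
    cs.foldl (fun acc c => if pvCell acc c.1 c.2 == -1 then pvSetCell acc c.1 c.2 v else acc) M
      = (cs.filter fun c => pvCell M0 c.1 c.2 == -1).foldl
          (fun acc c => pvSetCell acc c.1 c.2 v) M := by
  intro cs
  induction cs with
  | nil => intro M0 M _ _; rfl
  | cons c cs ih =>
    intro M0 M hag hnd
    have hc : pvCell M c.1 c.2 = pvCell M0 c.1 c.2 := hag c (by simp)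
    have hmem : c ∉ cs := (List.nodup_cons.mp hnd).1
    have hnd' : cs.Nodup := (List.nodup_cons.mp hnd).2
    by_cases hcond : (pvCell M0 c.1 c.2 == -1) = true
    · simp only [List.foldl_cons, List.filter_cons, hcond, hc, if_true, List.foldl_cons]
      exact ih M0 _ (fun c' hc' => by
        rw [pvCell_setCell_ne M v (fun he => hmem (by rwa [he] at hc'))]
        exact hag c' (List.mem_cons_of_mem _ hc')) hnd'
    · rw [Bool.not_eq_true] at hcond
      simp only [List.foldl_cons, List.filter_cons, hcond, hc, if_false, Bool.false_eq_true]
      exact ih M0 M (fun c' hc' => hag c' (List.mem_cons_of_mem _ hc')) hnd'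

-- folding over a flatMap is the nested fold
lemma pv_foldl_flatMap {α β γ : Type} (g : α → List β) (f : γ → β → γ) :
    ∀ (l : List α) (init : γ),
    (l.flatMap g).foldl f init = l.foldl (fun acc x => (g x).foldl f acc) init := by
  intro l
  induction l with
  | nil => intro init; rfl
  | cons x l ih => intro init; simp [List.flatMap_cons, List.foldl_append, ih]

-- the coordinate grid both ports traverse: it is the list product of the two ranges
lemma pv_grid_eq (a b : Nat) :
    ((List.range a).flatMap fun i => (List.range b).map fun j => (i, j))
      = List.range a ×ˢ List.range b := rfl

lemma pv_grid_mem {a b : Nat} {c : Nat × Nat} :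
    c ∈ List.range a ×ˢ List.range b ↔ c.1 < a ∧ c.2 < b := by
  rcases c with ⟨i, j⟩; simp

-- cells of m ++ [trash] agree with m on the original rows
lemma pvCell_append (m : List (List Int)) (t : List Int) {i : Nat} (hi : i < m.length) (j : Nat) :
    pvCell (m ++ [t]) i j = pvCell m i j := by
  unfold pvCell
  have hrow : (m ++ [t]).getD i [] = m.getD i [] := by
    rw [List.getD_eq_getElem?_getD, List.getD_eq_getElem?_getD, List.getElem?_append_left hi]
  rw [hrow]

-- B's missing list is the grid filtered by the original matrix
lemma pv_missing_eq (m : List (List Int)) (b : Nat) :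
    ((List.range m.length).flatMap fun i =>
        ((List.range b).filter fun j => pvCell m i j == -1).map fun j => (i, j))
      = (List.range m.length ×ˢ List.range b).filter fun c => pvCell m c.1 c.2 == -1 := by
  rw [← pv_grid_eq, List.filter_flatMap]
  simp [List.filter_map, Function.comp_def]

-- A's rewrite loop produces the same matrix as B's targeted writes
lemma pv_m2_eq (m : List (List Int)) (b : Nat) (M : List (List Int))
    (hM : ∀ i < m.length, ∀ j, pvCell M i j = pvCell m i j) :
    (List.range m.length).foldl (fun acc i =>
        (List.range b).foldl (fun acc j =>
          if pvCell acc i j == -1 then pvSetCell acc i j (m.length : Int) else acc) acc) M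
      = ((List.range m.length).flatMap fun i =>
          ((List.range b).filter fun j => pvCell m i j == -1).map fun j => (i, j)).foldl
          (fun acc c => pvSetCell acc c.1 c.2 (m.length : Int)) M := by
  have h1 := (pv_foldl_flatMap (fun i => (List.range b).map fun j => ((i : Nat), j))
      (fun acc (c : Nat × Nat) =>
        if pvCell acc c.1 c.2 == -1 then pvSetCell acc c.1 c.2 (m.length : Int) else acc)
      (List.range m.length) M)
  simp only [List.foldl_map] at h1
  rw [← h1, pv_grid_eq,
    pv_freeze (m.length : Int) _ M M (fun _ _ => rfl)
      ((List.nodup_range).product (List.nodup_range)),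
    pv_missing_eq,
    List.filter_congr (fun c hc => by
      rw [hM c.1 (pv_grid_mem.mp hc).1 c.2])]

-- the completeness test and B's "no missing coordinate" test agree
lemma pv_complete_iff (m : List (List Int)) :
    pvEstComplet m = true ↔
      ((List.range m.length).flatMap fun i =>
        ((List.range (m.headD []).length).filter fun j => pvCell m i j == -1).map
          fun j => (i, j)) = [] := by
  unfold pvEstComplet
  simp only [List.all_eq_true, List.mem_range, List.flatMap_eq_nil_iff, List.map_eq_nil_iff,
    List.filter_eq_nil_iff, Bool.not_eq_eq_eq_not, Bool.not_true]
  constructor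
  · intro h i hi j hj
    have := h i hi j hj
    simp_all
  · intro h i hi j hj
    have := h i hi j hj
    simp_all

-- ===== VERDICT (by name: the statement is the Claim_ definition above) =====
theorem Complet_spec : Claim_equal_Complet := by
  intro automate _ _
  unfold Spec_Complet
  simp only [Complet, Complet_alt]
  cases h : (PySem.Dict.mk automate).get? "matrice" with
  | none => rfl
  | some m =>
    dsimp only
    by_cases hc : pvEstComplet m = true
    · rw [if_pos hc, (pv_complete_iff m).mp hc]
      simp
    · have hne := (not_iff_not.mpr (pv_complete_iff m)).mp hc
      rw [if_neg hc, if_neg (fun hemp => hne (List.isEmpty_iff.mp hemp))]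
      exact congrArg (fun x => ((PySem.Dict.mk automate).insert "matrice" x).items)
        (pv_m2_eq m (m.headD []).length _ (fun i hi j => pvCell_append m _ hi j))
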